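-- pv_equiv track=rewrite | github.com/BNovaW/-Like-in-Spoken-vs-Written-English | Final.py | key_tokenize
-- ===== SOURCE A (Python) =====
-- def key_tokenize(input_string,gram_size=1, separator = " "): #input_string = text string
--
-- 	tokenized = [] #empty list that will be returned
--
-- 	#these are the punctuation marks in the Brown corpus + '"'
-- 	punct_list = ['-',',','.',"'",'&','`','?','!',';',':','(',')','$','/','%','*','+','[',']','{','}','"']
--
-- 	#this is a sample (but potentially incomplete) list of items to replace with spaces
-- 	replace_list = ["\n","\t"]
--
-- 	#This is a sample (but potentially incomplete) list if items to ignore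
-- 	ignore_list = [""]
--
-- 	#iterate through the punctuation list and delete each item
-- 	for x in punct_list:
-- 		input_string = input_string.replace(x, "") #instead of adding a space before punctuation marks, we will delete them (by replacing with nothing)
--
-- 	#iterate through the replace list and replace it with a space
-- 	for x in replace_list:
-- 		input_string = input_string.replace(x," ")
--
-- 	#our examples will be in English, so for now we will lower them
-- 	#this is, of course optional
-- 	input_string = input_string.lower()
--
-- 	#then we split the string into a list
-- 	input_list = input_string.split(" ")
--
-- 	for x in input_list:
-- 		if x not in ignore_list: #if item is not in the ignore list
-- 			tokenized.append(x) #add it to the list "tokenized"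
--
-- 	if gram_size == 1: #if we are looking at single words, simply return tokenized
-- 		return(tokenized)
--
-- 	else: #otherwise, return n-gram text, using the ngrammer() function
-- 		return(ngrammer(tokenized,gram_size,separator))
--
-- def ngrammer(token_list, gram_size, separator = " "):
-- 	ngrammed = [] #empty list for n-grams
--
-- 	for idx, x in enumerate(token_list): #iterate through the token list using enumerate()
--
-- 		ngram = token_list[idx:idx+gram_size] #get current word token_list plus words n-words after (this is a list)
--
-- 		if len(ngram) == gram_size: #don't include shorter ngrams that we would get at the end of a text
-- 			ngrammed.append(separator.join(ngram)) # join the list of ngram items using the separator (by default this is a space), add to ngrammed list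
--
-- 	return(ngrammed) #return list of ngrams
-- ===== SOURCE B (Python) =====
-- def key_tokenize(input_string, gram_size=1, separator=" "):
--     # one translation table instead of 24 sequential .replace passes
--     table = str.maketrans("\n\t", "  ", "-,.'&`?!;:()$/%*+[]{}\"")
--     tokens = [t for t in input_string.translate(table).lower().split(" ") if t != ""]
--     if gram_size < 1 or gram_size > len(tokens):
--         return []
--     # n-grams as zip of shifted token streams instead of index slicing
--     return [separator.join(t) for t in zip(*(tokens[i:] for i in range(gram_size)))]
-- ===== Notes on version B (the rewrite author's own statement) =====
-- stated objective: idiomatic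
-- what changed: One str.translate table replaces the 24 sequential .replace passes, the empty-token filter is a comprehension, and n-grams are built with the zip-of-shifted-streams idiom guarded by a single size check instead of index slicing with a per-slice length test; the gram_size==1 branch disappears.
-- intended difference: For gram_size == 0 on text containing at least one non-punctuation, non-whitespace character A returns a list of empty strings (one per token, from its zero-length slices), while B returns the empty list, which is the intended answer for a nonpositive n-gram size. — e.g. on key_tokenize("a b", 0, " "): A returns ["", ""], B returns []
import Mathlib
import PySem

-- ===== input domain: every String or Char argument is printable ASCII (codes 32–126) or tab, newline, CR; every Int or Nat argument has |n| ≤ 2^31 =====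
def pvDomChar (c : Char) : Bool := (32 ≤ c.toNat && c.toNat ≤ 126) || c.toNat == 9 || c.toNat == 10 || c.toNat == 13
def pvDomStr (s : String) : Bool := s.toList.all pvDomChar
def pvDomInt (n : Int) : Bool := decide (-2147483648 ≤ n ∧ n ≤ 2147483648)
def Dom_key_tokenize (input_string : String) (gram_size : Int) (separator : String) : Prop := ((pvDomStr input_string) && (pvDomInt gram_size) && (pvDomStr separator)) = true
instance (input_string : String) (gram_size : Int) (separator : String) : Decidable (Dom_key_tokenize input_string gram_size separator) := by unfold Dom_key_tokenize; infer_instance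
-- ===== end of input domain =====

-- B replaces A's 24 sequential .replace passes by one per-character translation table and the
-- index-slicing n-gram loop by the zip-of-shifted-streams idiom (objective: idiomatic); for
-- gram_size == 0 B intentionally returns [] where A returns one empty string per token (see D_).

-- ===== PORT A =====
def pvPunctList : List String :=
  ["-", ",", ".", "'", "&", "`", "?", "!", ";", ":", "(", ")", "$", "/", "%", "*", "+", "[", "]", "{", "}", "\""]
def pvReplaceList : List String := ["\n", "\t"]
def pvIgnoreList : List String := [""]

def ngrammer (token_list : List String) (gram_size : Int) (separator : String) : List String :=
  (PySem.List.enumerate token_list).foldl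
    (fun ngrammed p =>
      let ngram := PySem.List.slice token_list (some p.1) (some (p.1 + gram_size))
      if ((ngram.length : Int) = gram_size) then ngrammed ++ [PySem.Str.join separator ngram]
      else ngrammed) []

def key_tokenize (input_string : String) (gram_size : Int) (separator : String) : List String :=
  let s1 := pvPunctList.foldl (fun s x => PySem.Str.replace s x "") input_string
  let s2 := pvReplaceList.foldl (fun s x => PySem.Str.replace s x " ") s1
  let s3 := PySem.Str.lower s2
  -- .split(" "): sep is the nonempty literal " ", so Python never raises; Str.split? = some of this
  let input_list := (PySem.Chars.splitOn s3.toList " ".toList).map String.ofList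
  let tokenized := input_list.foldl (fun acc x => if x ∉ pvIgnoreList then acc ++ [x] else acc) []
  if gram_size = 1 then tokenized else ngrammer tokenized gram_size separator

-- ===== PORT B =====
-- exact port of str.translate with the table {punct → delete, '\n' '\t' → ' '}
def pvTrChar (c : Char) : Option Char :=
  if c ∈ ['-', ',', '.', '\'', '&', '`', '?', '!', ';', ':', '(', ')', '$', '/', '%', '*', '+', '[', ']', '{', '}', '"'] then none
  else if c = '\n' ∨ c = '\t' then some ' '
  else some c

-- zip(*ls): truncate to the shortest; zip() of no iterables is empty
def pvZipMany (ls : List (List String)) : List (List String) :=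
  match ls with
  | [] => []
  | [l] => l.map (fun x => [x])
  | l :: ls => List.zipWith List.cons l (pvZipMany ls)

def key_tokenize_alt (input_string : String) (gram_size : Int) (separator : String) : List String :=
  let translated := String.ofList (input_string.toList.filterMap pvTrChar)
  -- .split(" "): sep is the nonempty literal " ", so Python never raises; Str.split? = some of this
  let tokens := ((PySem.Chars.splitOn (PySem.Str.lower translated).toList " ".toList).map String.ofList).filter
    (fun t => t ≠ "")
  if gram_size < 1 ∨ (tokens.length : Int) < gram_size then []
  else (pvZipMany ((PySem.List.pyRange 0 gram_size 1).map
          (fun i => PySem.List.slice tokens (some i) none))).map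
        (fun t => PySem.Str.join separator t)

-- ===== PRECONDITION & SPEC =====
-- For gram_size == 0 on text with at least one non-punctuation, non-whitespace character, A returns
-- one empty string per token (its zero-length slices all pass the length check), while B returns [],
-- the intended empty result for a nonpositive n-gram size.
def D_key_tokenize (input_string : String) (gram_size : Int) (separator : String) : Prop :=
  gram_size = 0 ∧ input_string.toList.any
    (fun c => !(("-,.'&`?!;:()$/%*+[]{}\" \n\t" : String).toList.contains c))
instance (input_string : String) (gram_size : Int) (separator : String) : Decidable (D_key_tokenize input_string gram_size separator) := by unfold D_key_tokenize; infer_instance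

def Spec_key_tokenize (input_string : String) (gram_size : Int) (separator : String) (out : List String) : Prop := ¬ D_key_tokenize input_string gram_size separator → out = key_tokenize_alt input_string gram_size separator
instance (input_string : String) (gram_size : Int) (separator : String) (out : List String) : Decidable (Spec_key_tokenize input_string gram_size separator out) := by unfold Spec_key_tokenize; infer_instance

def pvDiffWitness_key_tokenize : String × Int × String := ("a b", 0, " ")
def pvDiffWitnessOut_key_tokenize : (List String) × (List String) := (["", ""], [])

-- ===== CLAIM (what is proved, stated in full; the proofs are below) =====
def Claim_unchanged_key_tokenize : Prop := ∀ (input_string : String) (gram_size : Int) (separator : String), Dom_key_tokenize input_string gram_size separator → Spec_key_tokenize input_string gram_size separator (key_tokenize input_string gram_size separator)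
def Claim_changed_key_tokenize : Prop := Dom_key_tokenize (pvDiffWitness_key_tokenize.1) (pvDiffWitness_key_tokenize.2.1) (pvDiffWitness_key_tokenize.2.2) ∧ D_key_tokenize (pvDiffWitness_key_tokenize.1) (pvDiffWitness_key_tokenize.2.1) (pvDiffWitness_key_tokenize.2.2) ∧ key_tokenize (pvDiffWitness_key_tokenize.1) (pvDiffWitness_key_tokenize.2.1) (pvDiffWitness_key_tokenize.2.2) = pvDiffWitnessOut_key_tokenize.1 ∧ key_tokenize_alt (pvDiffWitness_key_tokenize.1) (pvDiffWitness_key_tokenize.2.1) (pvDiffWitness_key_tokenize.2.2) = pvDiffWitnessOut_key_tokenize.2 ∧ pvDiffWitnessOut_key_tokenize.1 ≠ pvDiffWitnessOut_key_tokenize.2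
def Claim_exact_key_tokenize : Prop := ∀ (input_string : String) (gram_size : Int) (separator : String), Dom_key_tokenize input_string gram_size separator → D_key_tokenize input_string gram_size separator → key_tokenize input_string gram_size separator ≠ key_tokenize_alt input_string gram_size separator

-- ===== LEMMAS AND PROOFS =====

lemma pv_good_iff (s : String) :
    (s.toList.any (fun c => !(("-,.'&`?!;:()$/%*+[]{}\" \n\t" : String).toList.contains c)) = true)
    ↔ (s.toList.any (fun c => c ∉ ['-', ',', '.', '\'', '&', '`', '?', '!', ';', ':', '(', ')', '$', '/', '%', '*', '+', '[', ']', '{', '}', '"', ' ', '\n', '\t']) = true) := by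
  rw [show ("-,.'&`?!;:()$/%*+[]{}\" \n\t" : String).toList = ['-', ',', '.', '\'', '&', '`', '?', '!', ';', ':', '(', ')', '$', '/', '%', '*', '+', '[', ']', '{', '}', '"', ' ', '\n', '\t'] from rfl]
  simp

lemma pv_str_ext {a b : String} (h : a.toList = b.toList) : a = b := by
  have := congrArg String.ofList h; simpa using this

lemma pv_go_single (c : Char) (new : List Char) :
    ∀ (l : List Char) (fuel : Nat) (acc : List Char), l.length ≤ fuel →
    PySem.Chars.replace.go [c] new fuel l acc
      = acc.reverse ++ l.flatMap (fun d => if d = c then new else [d]) := by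
  intro l
  induction l with
  | nil => intro fuel acc _; cases fuel <;> simp [PySem.Chars.replace.go]
  | cons d t ih =>
    intro fuel acc h
    cases fuel with
    | zero => simp at h
    | succ f =>
      rw [PySem.Chars.replace.go]
      simp only [List.length_cons, Nat.add_le_add_iff_right] at h
      by_cases hd : d = c
      · subst hd
        simp only [List.isPrefixOf, BEq.rfl, Bool.true_and, if_pos]
        rw [List.length_singleton, List.drop_succ_cons, List.drop_zero, ih _ _ h]
        simp
      · have hpre : List.isPrefixOf [c] (d :: t) = false := by
          simp [List.isPrefixOf]; exact fun h' => absurd h'.symm hd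
        rw [hpre, if_neg (by simp), ih _ _ h]
        simp [hd]

lemma pv_replace_single (s : List Char) (c : Char) (new : List Char) :
    PySem.Chars.replace s [c] new = s.flatMap (fun d => if d = c then new else [d]) := by
  rw [PySem.Chars.replace]
  simp [pv_go_single c new s s.length [] le_rfl]

-- A's 24 sequential replace passes compute B's single per-character translation
lemma pv_chain_eq (s : String) :
    pvReplaceList.foldl (fun s x => PySem.Str.replace s x " ")
      (pvPunctList.foldl (fun s x => PySem.Str.replace s x "") s)
    = String.ofList (s.toList.filterMap pvTrChar) := by
  apply pv_str_ext
  rw [show (String.ofList (s.toList.filterMap pvTrChar)).toList = s.toList.filterMap pvTrChar by simp]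
  simp only [pvPunctList, pvReplaceList, List.foldl_cons, List.foldl_nil,
    PySem.Str.toList_replace,
    show ("-" : String).toList = ['-'] from rfl, show ("," : String).toList = [','] from rfl,
    show ("." : String).toList = ['.'] from rfl, show ("'" : String).toList = ['\''] from rfl,
    show ("&" : String).toList = ['&'] from rfl, show ("`" : String).toList = ['`'] from rfl,
    show ("?" : String).toList = ['?'] from rfl, show ("!" : String).toList = ['!'] from rfl,
    show (";" : String).toList = [';'] from rfl, show (":" : String).toList = [':'] from rfl,
    show ("(" : String).toList = ['('] from rfl, show (")" : String).toList = [')'] from rfl,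
    show ("$" : String).toList = ['$'] from rfl, show ("/" : String).toList = ['/'] from rfl,
    show ("%" : String).toList = ['%'] from rfl, show ("*" : String).toList = ['*'] from rfl,
    show ("+" : String).toList = ['+'] from rfl, show ("[" : String).toList = ['['] from rfl,
    show ("]" : String).toList = [']'] from rfl, show ("{" : String).toList = ['{'] from rfl,
    show ("}" : String).toList = ['}'] from rfl, show ("\"" : String).toList = ['"'] from rfl,
    show ("\n" : String).toList = ['\n'] from rfl, show ("\t" : String).toList = ['\t'] from rfl,
    show ("" : String).toList = [] from rfl, show (" " : String).toList = [' '] from rfl]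
  simp only [pv_replace_single, List.flatMap_assoc, List.filterMap_eq_flatMap_toList]
  refine List.flatMap_congr ?_
  intro x _
  rcases eq_or_ne x '\n' with hn | hn
  · subst hn; simp [pvTrChar]
  rcases eq_or_ne x '\t' with ht | ht
  · subst ht; simp [pvTrChar]
  simp only [pvTrChar]
  split_ifs <;> simp_all <;> tauto

-- simple recursion computing Chars.splitOn with a single-char separator (proof helper)
def pvSplitF (c : Char) : List Char → List Char → List (List Char)
  | [], cur => [cur.reverse]
  | d :: t, cur => if d = c then cur.reverse :: pvSplitF c t [] else pvSplitF c t (d :: cur)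

lemma pv_split_go_single (c : Char) :
    ∀ (l : List Char) (fuel : Nat) (cur : List Char) (acc : List (List Char)), l.length < fuel →
    PySem.Chars.splitOn.go [c] fuel l cur acc = acc.reverse ++ pvSplitF c l cur := by
  intro l
  induction l with
  | nil =>
    intro fuel cur acc h
    cases fuel with
    | zero => omega
    | succ f => rw [PySem.Chars.splitOn.go]; simp [pvSplitF]; omega
  | cons d t ih =>
    intro fuel cur acc h
    cases fuel with
    | zero => omega
    | succ f =>
      rw [PySem.Chars.splitOn.go]
      simp only [List.length_cons, Nat.add_lt_add_iff_right] at h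
      by_cases hd : d = c
      · subst hd
        simp only [List.isPrefixOf, BEq.rfl, Bool.true_and, if_pos]
        rw [List.length_singleton, List.drop_succ_cons, List.drop_zero, ih _ _ _ h]
        simp [pvSplitF]
      · have hpre : List.isPrefixOf [c] (d :: t) = false := by
          simp [List.isPrefixOf]; exact fun h' => absurd h'.symm hd
        rw [hpre, if_neg (by simp), ih _ _ _ h]
        simp [pvSplitF, hd]


lemma pv_splitOn_single (l : List Char) (c : Char) :
    PySem.Chars.splitOn l [c] = pvSplitF c l [] := by
  rw [PySem.Chars.splitOn]
  simpa using pv_split_go_single c l (l.length + 1) [] [] (by omega)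

lemma pv_lowerChar_eq_space_iff (c : Char) : PySem.Chars.lowerChar c = ' ' ↔ c = ' ' := by
  unfold PySem.Chars.lowerChar PySem.Chars.isupper
  split_ifs with h
  · simp only [Bool.and_eq_true, decide_eq_true_eq] at h
    constructor
    · intro he
      have h1 : (Char.ofNat (c.toNat + 32)).toNat = 32 := by rw [he]; rfl
      have hle : c.toNat ≤ 90 := by
        have := h.2; simpa [Char.le_def] using this
      have hge : 65 ≤ c.toNat := by
        have := h.1; simpa [Char.le_def] using this
      have : (Char.ofNat (c.toNat + 32)).toNat = c.toNat + 32 := by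
        rw [Char.toNat_ofNat, if_pos]
        left; omega
      omega
    · intro he; subst he; simp_all [Char.le_def]
  · rfl


-- the token lists of the two ports coincide
lemma pv_tokens_eq (s : String) :
    ((PySem.Chars.splitOn (PySem.Str.lower
        (pvReplaceList.foldl (fun s x => PySem.Str.replace s x " ")
          (pvPunctList.foldl (fun s x => PySem.Str.replace s x "") s))).toList " ".toList).map String.ofList).foldl
      (fun acc x => if x ∉ pvIgnoreList then acc ++ [x] else acc) []
    = ((PySem.Chars.splitOn (PySem.Str.lower
        (String.ofList (s.toList.filterMap pvTrChar))).toList " ".toList).map String.ofList).filter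
      (fun t => t ≠ "") := by
  rw [pv_chain_eq]
  rw [PySem.List.foldl_append_ite_eq_filter (p := fun x => x ∉ pvIgnoreList)]
  simp only [List.nil_append]
  apply List.filter_congr
  intro x _
  simp [pvIgnoreList]

-- every piece of pvSplitF over an all-separator list is empty (modulo the seed)
lemma pv_splitF_all_sep (c : Char) :
    ∀ (l : List Char) (cur : List Char), (∀ d ∈ l, d = c) →
    ∀ p ∈ pvSplitF c l cur, p = cur.reverse ∨ p = [] := by
  intro l
  induction l with
  | nil => intro cur _ p hp; simp [pvSplitF] at hp; simp [hp]
  | cons d t ih =>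
    intro cur hall p hp
    have hd : d = c := hall d (by simp)
    rw [pvSplitF, if_pos hd] at hp
    rcases List.mem_cons.mp hp with h | h
    · simp [h]
    · rcases ih [] (fun x hx => hall x (by simp [hx])) p h with h' | h' <;> simp [h']

lemma pv_splitF_good (c : Char) :
    ∀ (l : List Char) (cur : List Char), ((∃ d ∈ l, d ≠ c) ∨ cur ≠ []) →
    ∃ p ∈ pvSplitF c l cur, p ≠ [] := by
  intro l
  induction l with
  | nil =>
    intro cur h
    rcases h with h | h
    · simp at h
    · exact ⟨cur.reverse, by simp [pvSplitF], by simpa using h⟩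
  | cons d t ih =>
    intro cur h
    by_cases hd : d = c
    · subst hd
      rw [pvSplitF, if_pos rfl]
      rcases h with ⟨x, hx, hxne⟩ | hcur
      · rcases List.mem_cons.mp hx with rfl | hxt
        · exact absurd rfl hxne
        · obtain ⟨p, hp, hpne⟩ := ih [] (Or.inl ⟨x, hxt, hxne⟩)
          exact ⟨p, by simp [hp], hpne⟩
      · exact ⟨cur.reverse, by simp, by simpa using hcur⟩
    · rw [pvSplitF, if_neg hd]
      apply ih
      right; simp

-- the token list is empty iff the input has no non-punctuation, non-whitespace character
lemma pv_tokens_nil_of_no_good (s : String)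
    (h : ¬ (s.toList.any (fun c => c ∉ ['-', ',', '.', '\'', '&', '`', '?', '!', ';', ':', '(', ')', '$', '/', '%', '*', '+', '[', ']', '{', '}', '"', ' ', '\n', '\t']) = true)) :
    ((PySem.Chars.splitOn (PySem.Str.lower
        (String.ofList (s.toList.filterMap pvTrChar))).toList " ".toList).map String.ofList).filter
      (fun t => t ≠ "") = [] := by
  have hall : ∀ c ∈ s.toList, c ∈ ['-', ',', '.', '\'', '&', '`', '?', '!', ';', ':', '(', ')', '$', '/', '%', '*', '+', '[', ']', '{', '}', '"', ' ', '\n', '\t'] := by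
    intro c hc
    by_contra hnc
    exact h (List.any_eq_true.mpr ⟨c, hc, by simpa using hnc⟩)
  have hL : ∀ d ∈ (PySem.Str.lower (String.ofList (s.toList.filterMap pvTrChar))).toList, d = ' ' := by
    rw [PySem.Str.toList_lower]
    intro d hd
    rw [show (String.ofList (s.toList.filterMap pvTrChar)).toList = s.toList.filterMap pvTrChar by simp] at hd
    simp only [PySem.Chars.lower, List.mem_map] at hd
    obtain ⟨e, he, rfl⟩ := hd
    rw [List.mem_filterMap] at he
    obtain ⟨c, hc, htr⟩ := he
    have hcmem := hall c hc
    have he' : e = ' ' := by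
      simp only [pvTrChar] at htr
      by_cases h1 : c ∈ ['-', ',', '.', '\'', '&', '`', '?', '!', ';', ':', '(', ')', '$', '/', '%', '*', '+', '[', ']', '{', '}', '"']
      · rw [if_pos h1] at htr; cases htr
      by_cases h2 : c = '\n' ∨ c = '\t'
      · rw [if_neg h1, if_pos h2] at htr
        exact (Option.some.inj htr).symm
      · rw [if_neg h1, if_neg h2] at htr
        have hc' : c = ' ' := by
          simp only [List.mem_cons, List.not_mem_nil, or_false] at hcmem h1
          tauto
        exact (Option.some.inj htr).symm.trans hc'
    rw [he']; rfl
  rw [show (" " : String).toList = [' '] from rfl, pv_splitOn_single]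
  rw [List.filter_eq_nil_iff]
  intro x hx
  rw [List.mem_map] at hx
  obtain ⟨p, hp, rfl⟩ := hx
  rcases pv_splitF_all_sep ' ' _ [] (by simpa using hL) p hp with h' | h' <;>
    simp [h']

lemma pv_tokens_ne_nil_of_good (s : String)
    (h : s.toList.any (fun c => c ∉ ['-', ',', '.', '\'', '&', '`', '?', '!', ';', ':', '(', ')', '$', '/', '%', '*', '+', '[', ']', '{', '}', '"', ' ', '\n', '\t']) = true) :
    ((PySem.Chars.splitOn (PySem.Str.lower
        (String.ofList (s.toList.filterMap pvTrChar))).toList " ".toList).map String.ofList).filter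
      (fun t => t ≠ "") ≠ [] := by
  simp only [List.any_eq_true, decide_eq_true_eq] at h
  obtain ⟨c, hc, hgood⟩ := h
  simp only [List.mem_cons, List.not_mem_nil, or_false] at hgood
  push_neg at hgood
  obtain ⟨h1,h2,h3,h4,h5,h6,h7,h8,h9,h10,h11,h12,h13,h14,h15,h16,h17,h18,h19,h20,h21,h22,hsp,hnl,htb⟩ := hgood
  have htr : pvTrChar c = some c := by
    simp only [pvTrChar]
    rw [if_neg (by simp; tauto), if_neg (by tauto)]
  have hmem : PySem.Chars.lowerChar c ∈ (PySem.Str.lower (String.ofList (s.toList.filterMap pvTrChar))).toList := by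
    rw [PySem.Str.toList_lower,
      show (String.ofList (s.toList.filterMap pvTrChar)).toList = s.toList.filterMap pvTrChar by simp]
    simp only [PySem.Chars.lower, List.mem_map]
    exact ⟨c, List.mem_filterMap.mpr ⟨c, hc, htr⟩, rfl⟩
  have hne : PySem.Chars.lowerChar c ≠ ' ' := fun he => hsp ((pv_lowerChar_eq_space_iff c).mp he)
  rw [show (" " : String).toList = [' '] from rfl, pv_splitOn_single]
  obtain ⟨p, hp, hpne⟩ := pv_splitF_good ' ' _ [] (Or.inl ⟨_, hmem, hne⟩)
  apply List.ne_nil_of_mem (a := String.ofList p)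
  rw [List.mem_filter]
  refine ⟨List.mem_map_of_mem hp, ?_⟩
  simp only [ne_eq, decide_eq_true_eq]
  intro he
  apply hpne
  have := congrArg String.toList he
  simpa using this

lemma pv_join_single (sep x : String) : PySem.Str.join sep [x] = x := by
  apply pv_str_ext; rw [PySem.Str.toList_join]; simp [PySem.Chars.join, List.intercalate]

-- A's n-gram loop as a filter-map over the index range
lemma pv_ngrammer_eq (toks : List String) (g : Int) (sep : String) :
    ngrammer toks g sep
      = (((List.range toks.length).filter
            (fun j : Nat => decide (((PySem.List.slice toks (some (j : Int)) (some ((j : Int) + g))).length : Int) = g))).map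
          (fun j : Nat => PySem.Str.join sep (PySem.List.slice toks (some (j : Int)) (some ((j : Int) + g))))) := by
  have h := PySem.List.foldl_append_if
      (p := fun p : Int × String => decide (((PySem.List.slice toks (some p.1) (some (p.1 + g))).length : Int) = g))
      (f := fun p : Int × String => PySem.Str.join sep (PySem.List.slice toks (some p.1) (some (p.1 + g))))
      (PySem.List.enumerate toks) []
  simp only [decide_eq_true_eq, List.nil_append] at h
  rw [ngrammer]
  rw [h]
  rw [PySem.List.enumerate_eq_map_pyRange toks ""]
  rw [List.filter_map, List.map_map]
  rw [show PySem.List.len toks = (toks.length : Int) from rfl]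
  rw [PySem.List.pyRange_zero_natCast]
  rw [List.filter_map, List.map_map]
  simp only [Function.comp_def]

lemma pv_ngrammer_neg (toks : List String) (g : Int) (sep : String) (hg : g < 0) :
    ngrammer toks g sep = [] := by
  rw [pv_ngrammer_eq]
  have : ∀ j : Nat, (((PySem.List.slice toks (some (j : Int)) (some ((j : Int) + g))).length : Int) = g) = False := by
    intro j; simp only [eq_iff_iff, iff_false]; intro h; omega
  simp [this]

lemma pv_ngrammer_zero_length (toks : List String) (sep : String) :
    (ngrammer toks 0 sep).length = toks.length := by
  rw [pv_ngrammer_eq]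
  have hz : ∀ j : Nat, PySem.List.slice toks (some (j : Int)) (some (j : Int)) = [] := by
    intro j
    have := PySem.List.slice_natCast_add toks j 0
    simpa using this
  simp [hz]

lemma pv_filter_range_le (m n : Nat) (h : m < n) :
    (List.range n).filter (fun j => decide (j ≤ m)) = List.range (m + 1) := by
  induction n with
  | zero => omega
  | succ k ih =>
    rw [List.range_succ, List.filter_append]
    rcases Nat.lt_or_ge m k with hk | hk
    · rw [ih hk]
      simp [Nat.not_le.mpr hk]
    · have hmk : m = k := by omega
      subst hmk
      have hself : List.filter (fun j => decide (j ≤ m)) (List.range m) = List.range m :=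
        List.filter_eq_self.mpr (fun a ha => by
          simp only [decide_eq_true_eq]
          exact Nat.le_of_lt (List.mem_range.mp ha))
      rw [hself, List.range_succ]
      simp

lemma pv_ngrammer_big (toks : List String) (g : Nat) (sep : String) (hg : toks.length < g) :
    ngrammer toks (g : Int) sep = [] := by
  rw [pv_ngrammer_eq]
  have hs : ∀ j : Nat, PySem.List.slice toks (some (j : Int)) (some ((j : Int) + (g : Int))) = (toks.drop j).take g :=
    fun j => PySem.List.slice_natCast_add toks j g
  have : ∀ j : Nat, (((PySem.List.slice toks (some (j : Int)) (some ((j : Int) + (g : Int)))).length : Int) = (g : Int)) = False := by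
    intro j
    rw [hs j]
    simp only [eq_iff_iff, iff_false]
    intro h
    have := List.length_take_le g (toks.drop j)
    have h2 : (toks.drop j).length ≤ toks.length := by simp
    have h3 : ((toks.drop j).take g).length ≤ (toks.drop j).length := List.length_take_le' _ _
    omega
  simp [this]

lemma pv_ngrammer_main (toks : List String) (g : Nat) (sep : String) (h1 : 1 ≤ g) (h2 : g ≤ toks.length) :
    ngrammer toks (g : Int) sep
      = (List.range (toks.length - g + 1)).map (fun j => PySem.Str.join sep ((toks.drop j).take g)) := by
  rw [pv_ngrammer_eq]
  have hs : ∀ j : Nat, PySem.List.slice toks (some (j : Int)) (some ((j : Int) + (g : Int))) = (toks.drop j).take g :=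
    fun j => PySem.List.slice_natCast_add toks j g
  have hcond : ∀ j : Nat, (fun j : Nat => decide (((PySem.List.slice toks (some (j : Int)) (some ((j : Int) + (g : Int)))).length : Int) = (g : Int))) j = decide (j ≤ toks.length - g) := by
    intro j
    simp only [hs j, decide_eq_decide, List.length_take, List.length_drop]
    omega
  rw [List.filter_congr (fun j _ => hcond j)]
  rw [pv_filter_range_le _ _ (by omega)]
  apply List.map_congr_left
  intro j hj
  rw [hs j]

-- sliding windows of width g (proof helper for the zip-of-shifts idiom)
def pvWin (g : Nat) : List String → List (List String)
  | [] => []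
  | x :: t => if g ≤ t.length + 1 then (x :: t).take g :: pvWin g t else []

lemma pv_zipMany_cons_of_ne (l : List String) (ls : List (List String)) (h : ls ≠ []) :
    pvZipMany (l :: ls) = List.zipWith List.cons l (pvZipMany ls) := by
  cases ls with
  | nil => exact absurd rfl h
  | cons a as => rfl

lemma pv_win_nil (g : Nat) (l : List String) (h : l.length < g) : pvWin g l = [] := by
  cases l with
  | nil => rfl
  | cons x t => rw [pvWin, if_neg (by simp at h ⊢; omega)]

lemma pv_win_cons (x : String) (t : List String) (g : Nat) (hg : 1 ≤ g) :
    List.zipWith List.cons (x :: t) (pvWin g t) = pvWin (g + 1) (x :: t) := by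
  induction t generalizing x with
  | nil =>
    rw [pv_win_nil g [] (by simpa using hg), pv_win_nil (g+1) [x] (by simp; omega)]
    rfl
  | cons y u ih =>
    rcases Nat.lt_or_ge (u.length + 1) g with hlen | hlen
    · rw [pv_win_nil g (y :: u) (by simpa using hlen), pv_win_nil (g+1) (x :: y :: u) (by simp; omega)]
      rfl
    · have e1 : pvWin g (y :: u) = (y :: u).take g :: pvWin g u := by
        rw [pvWin, if_pos (by simpa using hlen)]
      have e2 : pvWin (g+1) (x :: y :: u) = (x :: y :: u).take (g+1) :: pvWin (g+1) (y :: u) := by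
        rw [pvWin, if_pos (by simp; omega)]
      rw [e1, e2, List.zipWith_cons_cons, List.take_succ_cons, ih y]

lemma pv_zipMany_eq_win (toks : List String) (g : Nat) (hg : 1 ≤ g) :
    pvZipMany ((List.range g).map (fun i => toks.drop i)) = pvWin g toks := by
  induction toks generalizing g with
  | nil =>
    match g, hg with
    | 1, _ => rfl
    | (k+2), _ =>
      rw [List.range_succ_eq_map, List.map_cons]
      rw [pv_zipMany_cons_of_ne _ _ (by simp)]
      simp [pvWin]
  | cons x t ih =>
    match g, hg with
    | 1, _ =>
      have h1 : pvZipMany ((List.range 1).map (fun i => t.drop i)) = pvWin 1 t := ih 1 le_rfl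
      have h2 : (List.range 1).map (fun i => t.drop i) = [t] := by simp
      rw [h2] at h1
      show (x :: t).map (fun x => [x]) = pvWin 1 (x :: t)
      rw [List.map_cons, pvWin, if_pos (by omega)]
      simpa using h1
    | (k+2), _ =>
      rw [List.range_succ_eq_map, List.map_cons, List.map_map]
      have hcomp : ((fun i => (x :: t).drop i) ∘ Nat.succ) = (fun i => t.drop i) := by
        funext i; simp
      rw [hcomp, List.drop_zero]
      rw [pv_zipMany_cons_of_ne _ _ (by simp)]
      rw [ih (k+1) (by omega)]
      exact pv_win_cons x t (k+1) (by omega)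

lemma pv_win_eq_range (toks : List String) (g : Nat) (h1 : 1 ≤ g) (h2 : g ≤ toks.length) :
    pvWin g toks = (List.range (toks.length - g + 1)).map (fun j => (toks.drop j).take g) := by
  induction toks with
  | nil => simp at h2; omega
  | cons x t ih =>
    rw [pvWin, if_pos (by simp at h2 ⊢; omega)]
    rcases Nat.lt_or_ge t.length g with hlen | hlen
    · have hg : g = t.length + 1 := by simp at h2; omega
      rw [pv_win_nil g t hlen]
      rw [show (x :: t).length - g + 1 = 1 from by simp [hg]]
      simp
    · rw [ih hlen]
      have hlen2 : (x :: t).length - g + 1 = (t.length - g + 1) + 1 := by simp; omega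
      conv_rhs => rw [hlen2, List.range_succ_eq_map]
      rw [List.map_cons, List.map_map, List.drop_zero]
      congr 1

lemma pv_alt_main (toks : List String) (g : Nat) (sep : String) (h1 : 1 ≤ g) (h2 : g ≤ toks.length) :
    (pvZipMany ((PySem.List.pyRange 0 (g : Int) 1).map
        (fun i => PySem.List.slice toks (some i) none))).map (fun t => PySem.Str.join sep t)
      = (List.range (toks.length - g + 1)).map (fun j => PySem.Str.join sep ((toks.drop j).take g)) := by
  rw [PySem.List.pyRange_zero_natCast, List.map_map]
  have hcomp : ((fun i => PySem.List.slice toks (some i) none) ∘ (fun k : Nat => (k : Int)))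
      = (fun i : Nat => toks.drop i) := by
    funext i
    simp [Function.comp, PySem.List.slice_from_natCast]
  rw [hcomp, pv_zipMany_eq_win toks g h1, pv_win_eq_range toks g h1 h2, List.map_map]
  simp [Function.comp]

lemma pv_alt_one (toks : List String) (sep : String) :
    (pvZipMany ((PySem.List.pyRange 0 (1 : Int) 1).map
        (fun i => PySem.List.slice toks (some i) none))).map (fun t => PySem.Str.join sep t) = toks := by
  have h0 : (PySem.List.pyRange 0 (1 : Int) 1).map (fun i => PySem.List.slice toks (some i) none) = [toks] := by
    rw [show PySem.List.pyRange 0 (1 : Int) 1 = [(0 : Int)] from rfl]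
    simp [PySem.List.slice_from]
  rw [h0]
  show (toks.map (fun x => [x])).map (fun t => PySem.Str.join sep t) = toks
  rw [List.map_map]
  simp [Function.comp_def, pv_join_single]

-- ===== VERDICT (by name: the statement is the Claim_ definition above) =====
theorem key_tokenize_spec : Claim_unchanged_key_tokenize := by
  intro s g sep _ hD
  unfold key_tokenize key_tokenize_alt
  simp only []
  rw [pv_tokens_eq]
  set T := ((PySem.Chars.splitOn (PySem.Str.lower
      (String.ofList (s.toList.filterMap pvTrChar))).toList " ".toList).map String.ofList).filter
    (fun t => t ≠ "") with hT
  by_cases h1 : g = 1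
  · subst h1
    rw [if_pos rfl]
    by_cases hlen : ((T.length : Int) < 1)
    · have hTnil : T = [] := List.length_eq_zero_iff.mp (by omega)
      rw [if_pos (Or.inr hlen), hTnil]
    · rw [if_neg (by omega)]
      exact (pv_alt_one T sep).symm
  · rw [if_neg h1]
    by_cases hg0 : g < 1
    · rw [if_pos (Or.inl hg0)]
      rcases eq_or_lt_of_le (by omega : g ≤ 0) with hz | hneg
      · subst hz
        have hnog : ¬ (s.toList.any (fun c => c ∉ ['-', ',', '.', '\'', '&', '`', '?', '!', ';', ':', '(', ')', '$', '/', '%', '*', '+', '[', ']', '{', '}', '"', ' ', '\n', '\t']) = true) := by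
          intro hany
          exact hD ⟨rfl, (pv_good_iff s).mpr hany⟩
        rw [hT, pv_tokens_nil_of_no_good s hnog]
        rw [pv_ngrammer_eq]
        simp
      · exact pv_ngrammer_neg T g sep hneg
    · have hg2 : 2 ≤ g := by omega
      have hgg : g = ((g.toNat : Nat) : Int) := (Int.toNat_of_nonneg (by omega)).symm
      by_cases hbig : ((T.length : Int) < g)
      · rw [if_pos (Or.inr hbig), hgg]
        exact pv_ngrammer_big T g.toNat sep (by omega)
      · rw [if_neg (by omega), hgg]
        rw [pv_ngrammer_main T g.toNat sep (by omega) (by omega)]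
        exact (pv_alt_main T g.toNat sep (by omega) (by omega)).symm

set_option maxRecDepth 8192 in
theorem key_tokenize_changed : Claim_changed_key_tokenize := by unfold Claim_changed_key_tokenize; decide

theorem key_tokenize_tight : Claim_exact_key_tokenize := by
  intro s g sep _ hD he
  obtain ⟨rfl, hany⟩ := hD
  rw [key_tokenize, key_tokenize_alt] at he
  simp only [if_pos (Or.inl (by omega : (0:Int) < 1)), if_neg (by omega : ¬ ((0:Int) = 1))] at he
  rw [pv_tokens_eq] at he
  have hlen := congrArg List.length he
  rw [pv_ngrammer_zero_length] at hlen
  have hne := pv_tokens_ne_nil_of_good s ((pv_good_iff s).mp hany)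
  simp only [List.length_nil] at hlen
  exact hne (List.length_eq_zero_iff.mp hlen)
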